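-- pv_equiv track=rewrite | github.com/Phyisis/Problems | src/helpers/helpers/primes.py | lucasPP
-- ===== SOURCE A (Python) =====
-- from math import log, gcd, prod
--
-- def iroot(k, n): # assume n > 0
--     u, s, k1 = n, n+1, k-1
--     while u < s:
--         s = u
--         u = (k1 * u + n // u ** k1) // k
--     return s
--
-- def jacobiSymbol(n, k): # k > 0, k%2==1
--     n,t = n%k, 1
--     while n != 0:
--         while n % 2 == 0:
--             n >>= 1
--             r = k%8
--             if r == 3 or r == 5:
--                 t = -t
--         n, k = k, n
--         if n % 4 == 3 and k % 4 == 3: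
--             t = -t
--         n %= k
--     if k == 1: return t
--     return 0
--
-- def lucasPP(n):
--     if n%2==0 or n<3: return n==2
--     if iroot(2,n)**2 == n: return False
--     dAbs, sign, d = 5, 1, 5
--     while True:
--         if 1 < gcd(d, n) < n: return False
--         if jacobiSymbol(d, n) == -1: break
--         dAbs, sign = dAbs + 2, sign * -1
--         d = dAbs * sign
--     p, q, t = 1, (1-d)//4, (n+1)//2
--     u, u2, v, v2, q, q2 = 0, 1, 2, p, q, 2*q
--     for i in range(t.bit_length()):
--         u2 = (u2 * v2) % n
--         v2 = (v2 * v2 - q2) % n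
--         if t & (1 << i):
--             u, v = u2 * v + u * v2, (v2 * v) + (u2 * u * d)
--             if u%2==1: u += n
--             u = (u // 2) % n
--             if v%2==1: v += n
--             v = (v // 2) % n
--         if i < t.bit_length() - 1:
--             q = pow(q,2,n)
--             q2 = q + q
--     return u == 0
-- ===== SOURCE B (Python) =====
-- from math import gcd
--
-- def iroot(k, n): # assume n > 0
--     u, s, k1 = n, n+1, k-1
--     while u < s:
--         s = u
--         u = (k1 * u + n // u ** k1) // k
--     return s
--
-- def jacobiSymbol(n, k): # k > 0, k%2==1
--     n,t = n%k, 1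
--     while n != 0:
--         while n % 2 == 0:
--             n >>= 1
--             r = k%8
--             if r == 3 or r == 5:
--                 t = -t
--         n, k = k, n
--         if n % 4 == 3 and k % 4 == 3:
--             t = -t
--         n %= k
--     if k == 1: return t
--     return 0
--
-- def _select_d(n):
--     # find the first D in 5, -7, 9, -11, ... with jacobi(D|n) == -1;
--     # None signals a gcd-detected factor (composite)
--     d_abs = 5
--     while True:
--         d = d_abs if d_abs % 4 == 1 else -d_abs
--         if 1 < gcd(d, n) < n:
--             return None
--         if jacobiSymbol(d, n) == -1:
--             return d
--         d_abs += 2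
--
-- def _halve(x, n):
--     # (x/2) mod n for odd n, branchless
--     return ((x + x % 2 * n) // 2) % n
--
-- def lucasPP(n):
--     if n < 3 or n % 2 == 0:
--         return n == 2
--     if iroot(2, n) ** 2 == n:
--         return False
--     d = _select_d(n)
--     if d is None:
--         return False
--     q = (1 - d) // 4
--     e = n + 1
--     # MSB-first Lucas ladder over the bits of n+1: (u, v, qk) = (U_k, V_k, Q^k) mod n, P = 1
--     u, v, qk = 1, 1, q % n
--     for i in range(e.bit_length() - 2, -1, -1):
--         u, v, qk = (u * v) % n, (v * v - 2 * qk) % n, (qk * qk) % n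
--         if (e >> i) % 2 == 1:
--             u, v, qk = _halve(u + v, n), _halve(d * u + v, n), (qk * q) % n
--     return u == 0
-- ===== Notes on version B (the rewrite author's own statement) =====
-- stated objective: alternative
-- what changed: A's LSB-first double-and-add over the bits of (n+1)//2, carrying six state values (u, u2, v, v2, q, q2) with a lagged Q-power update and an inline sign-alternating D-search, is replaced by an MSB-first Lucas ladder over the bits of n+1 written as a downward loop that maintains just (U_k, V_k, Q^k) with the standard doubling step, a branchless halving helper, and a separate D-search helper that derives the sign from d_abs % 4; guards and the perfect-square test are kept.
import Mathlib
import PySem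

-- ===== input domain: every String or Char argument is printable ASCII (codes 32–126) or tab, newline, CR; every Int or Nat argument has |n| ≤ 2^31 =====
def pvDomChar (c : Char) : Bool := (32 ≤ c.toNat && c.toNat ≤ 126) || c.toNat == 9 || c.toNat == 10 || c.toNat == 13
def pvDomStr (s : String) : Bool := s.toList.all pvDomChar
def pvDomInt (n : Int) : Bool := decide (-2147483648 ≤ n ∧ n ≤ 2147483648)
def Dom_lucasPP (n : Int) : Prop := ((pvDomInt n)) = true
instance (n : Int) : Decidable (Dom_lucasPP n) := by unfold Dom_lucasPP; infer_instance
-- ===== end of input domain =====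

-- B keeps A's guards, square test and the meaning of the D-search and replaces the core:
-- an MSB-first Lucas ladder over the bits of n+1 maintaining only (U_k, V_k, Q^k), written as
-- a downward recursion, instead of A's LSB-first double-and-add over the bits of (n+1)//2
-- carrying six state values.  Objective: alternative (same asymptotic cost).

-- ===== shared helpers (identical code in Source A and Source B: iroot and jacobiSymbol) =====

-- while-loops become fuelled recursions; the fuel is far beyond what any |n| ≤ 2^31 needs
def irootLoop (k nn : Int) : Nat → Int → Int → Int
  | 0, _, s => s
  | f+1, u, s =>
    if u < s then
      irootLoop k nn f (PySem.Int.floordiv ((k - 1) * u + PySem.Int.floordiv nn (u ^ (k - 1).toNat)) k) u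
    else s

def iroot (k nn : Int) : Int := irootLoop k nn 1000000 nn (nn + 1)

def jacInner (k : Int) : Nat → Int → Int → Int × Int
  | 0, n, t => (n, t)
  | f+1, n, t =>
    if PySem.Int.mod n 2 = 0 then
      let n := n >>> (1 : Nat)
      let r := PySem.Int.mod k 8
      let t := if r = 3 ∨ r = 5 then -t else t
      jacInner k f n t
    else (n, t)

def jacOuter : Nat → Int → Int → Int → Int
  | 0, _, _, t => t   -- fuel exhaustion, unreachable for |n| ≤ 2^31
  | f+1, n, k, t =>
    if n ≠ 0 then
      let (n, t) := jacInner k f n t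
      let (n, k) := (k, n)
      let t := if PySem.Int.mod n 4 = 3 ∧ PySem.Int.mod k 4 = 3 then -t else t
      let n := PySem.Int.mod n k
      jacOuter f n k t
    else if k = 1 then t else 0

def jacobiSymbol (n k : Int) : Int := jacOuter 1000000 (PySem.Int.mod n k) k 1

-- ===== PORT A =====

-- A's inline D-selection while-loop; `some none` = the gcd early return (False), `some (some d)` = break with d
def selectD (n : Int) : Nat → Int → Int → Int → Option (Option Int)
  | 0, _, _, _ => none   -- fuel exhaustion, unreachable for |n| ≤ 2^31
  | f+1, dAbs, sign, d =>
    if 1 < (Int.gcd d n : Int) ∧ (Int.gcd d n : Int) < n then some none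
    else if jacobiSymbol d n = -1 then some (some d)
    else selectD n f (dAbs + 2) (sign * -1) ((dAbs + 2) * (sign * -1))

-- A's inline parity-fixup halving:  if x%2==1: x+=n ;  (x//2) % n
def halfMod (nn x : Int) : Int :=
  PySem.Int.mod (PySem.Int.floordiv (if PySem.Int.mod x 2 = 1 then x + nn else x) 2) nn

-- A's LSB-first core loop body (one iteration of `for i in range(t.bit_length())`)
def stepA (n d t : Int) (L : Nat) (st : Int × Int × Int × Int × Int × Int) (i : Nat) :
    Int × Int × Int × Int × Int × Int :=
  match st with
  | (u, u2, v, v2, q, q2) =>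
    let u2 := PySem.Int.mod (u2 * v2) n
    let v2 := PySem.Int.mod (v2 * v2 - q2) n
    let (u, v) :=
      if PySem.Int.band t (1 <<< i) ≠ 0 then
        (halfMod n (u2 * v + u * v2), halfMod n (v2 * v + u2 * u * d))
      else (u, v)
    if i < L - 1 then
      let q := PySem.Int.mod (q * q) n   -- pow(q,2,n); exact since n > 0 here
      (u, u2, v, v2, q, q + q)
    else (u, u2, v, v2, q, q2)

def lucasCore (n d : Int) : Bool :=
  let q := PySem.Int.floordiv (1 - d) 4
  let t := PySem.Int.floordiv (n + 1) 2
  let L := PySem.Int.bitLength t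
  let st := (List.range L).foldl (stepA n d t L) (0, 1, 2, 1, q, 2 * q)
  st.1 == 0

def lucasPP (n : Int) : Bool :=
  if PySem.Int.mod n 2 = 0 ∨ n < 3 then n == 2
  else if iroot 2 n ^ 2 = n then false
  else match selectD n 1000000 5 1 5 with
    | none => false
    | some none => false
    | some (some d) => lucasCore n d

-- ===== PORT B =====

-- B's D-search helper `_select_d`: candidate magnitudes 5, 7, 9, …, sign read off dAbs % 4
def findD (n : Int) : Nat → Int → Option (Option Int)
  | 0, _ => none   -- fuel exhaustion, unreachable for |n| ≤ 2^31
  | f+1, dAbs =>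
    let d := if PySem.Int.mod dAbs 4 = 1 then dAbs else -dAbs
    if 1 < (Int.gcd d n : Int) ∧ (Int.gcd d n : Int) < n then some none
    else if jacobiSymbol d n = -1 then some (some d)
    else findD n f (dAbs + 2)

-- B's `_halve`: branchless (x/2) mod n
def halve (x nn : Int) : Int :=
  PySem.Int.mod (PySem.Int.floordiv (x + PySem.Int.mod x 2 * nn) 2) nn

-- B's ladder: `for i in range(e.bit_length()-2, -1, -1)` as a downward recursion on i+1
def ladder (n d q e : Int) : Nat → Int × Int × Int → Int × Int × Int
  | 0, st => st
  | i+1, (u, v, qk) =>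
    ladder n d q e i
      (let uu := PySem.Int.mod (u * v) n
       let vv := PySem.Int.mod (v * v - 2 * qk) n
       let qq := PySem.Int.mod (qk * qk) n
       if PySem.Int.mod (e >>> i) 2 = 1 then
         (halve (uu + vv) n, halve (d * uu + vv) n, PySem.Int.mod (qq * q) n)
       else (uu, vv, qq))

def lucasPP_alt (n : Int) : Bool :=
  if n < 3 ∨ PySem.Int.mod n 2 = 0 then n == 2
  else if iroot 2 n ^ 2 = n then false
  else match findD n 1000000 5 with
    | none => false
    | some none => false
    | some (some d) =>
      let q := PySem.Int.floordiv (1 - d) 4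
      let e := n + 1
      let fin := ladder n d q e (PySem.Int.bitLength e - 1) (1, 1, PySem.Int.mod q n)
      fin.1 == 0

-- ===== PRECONDITION & SPEC =====
def Spec_lucasPP (n : Int) (out : Bool) : Prop := out = lucasPP_alt n
instance (n : Int) (out : Bool) : Decidable (Spec_lucasPP n out) := by unfold Spec_lucasPP; infer_instance

-- ===== CLAIM (what is proved, stated in full; the proofs are below) =====
def Claim_equal_lucasPP : Prop := ∀ (n : Int), Dom_lucasPP n → Spec_lucasPP n (lucasPP n)

-- ===== LEMMAS AND PROOFS =====

-- The ring ℤ[√d] reduced mod n, as pairs (a, b) ↦ a + b√d over ZMod n.toNat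
def pvMul (m : Nat) (D : ZMod m) (x y : ZMod m × ZMod m) : ZMod m × ZMod m :=
  (x.1 * y.1 + D * (x.2 * y.2), x.1 * y.2 + x.2 * y.1)

def pvPow (m : Nat) (D : ZMod m) (x : ZMod m × ZMod m) : Nat → ZMod m × ZMod m
  | 0 => (1, 0)
  | k+1 => pvMul m D x (pvPow m D x k)

def pvNrm (m : Nat) (D : ZMod m) (x : ZMod m × ZMod m) : ZMod m := x.1 * x.1 - D * (x.2 * x.2)

-- the inverse of 2 mod m (m odd)
def pvH (m : Nat) : ZMod m := (((m + 1) / 2 : Nat) : ZMod m)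

-- W k = α^k where α = (1+√d)/2 ; U k = 2·im(W k), V k = 2·re(W k) are the Lucas sequences (P=1)
def pvW (n d : Int) (k : Nat) : ZMod n.toNat × ZMod n.toNat :=
  pvPow n.toNat ((d : ZMod n.toNat)) (pvH n.toNat, pvH n.toNat) k

def pvU (n d : Int) (k : Nat) : ZMod n.toNat := 2 * (pvW n d k).2
def pvV (n d : Int) (k : Nat) : ZMod n.toNat := 2 * (pvW n d k).1
def pvQc (n d : Int) : ZMod n.toNat := ((PySem.Int.floordiv (1 - d) 4 : Int) : ZMod n.toNat)

lemma pvMul_one_left (m : Nat) (D : ZMod m) (y : ZMod m × ZMod m) :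
    pvMul m D (1, 0) y = y := by
  unfold pvMul; exact Prod.ext (by ring) (by ring)

lemma pvMul_assoc (m : Nat) (D : ZMod m) (x y z : ZMod m × ZMod m) :
    pvMul m D (pvMul m D x y) z = pvMul m D x (pvMul m D y z) := by
  unfold pvMul; exact Prod.ext (by dsimp; ring) (by dsimp; ring)

lemma pvPow_add (m : Nat) (D : ZMod m) (x : ZMod m × ZMod m) (a b : Nat) :
    pvPow m D x (a + b) = pvMul m D (pvPow m D x a) (pvPow m D x b) := by
  induction a with
  | zero => simp [pvPow, pvMul_one_left]
  | succ a ih =>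
    have : a + 1 + b = (a + b) + 1 := by omega
    rw [this, pvPow, ih, pvPow, pvMul_assoc]

lemma pvNrm_mul (m : Nat) (D : ZMod m) (x y : ZMod m × ZMod m) :
    pvNrm m D (pvMul m D x y) = pvNrm m D x * pvNrm m D y := by
  unfold pvNrm pvMul; dsimp; ring

lemma pvNrm_pow (m : Nat) (D : ZMod m) (x : ZMod m × ZMod m) (k : Nat) :
    pvNrm m D (pvPow m D x k) = pvNrm m D x ^ k := by
  induction k with
  | zero => unfold pvPow pvNrm; dsimp; ring
  | succ k ih => rw [pvPow, pvNrm_mul, ih, pow_succ]; ring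

lemma pvH_two (m : Nat) (hm : m % 2 = 1) : (2 : ZMod m) * pvH m = 1 := by
  unfold pvH
  have h : 2 * ((m + 1) / 2) = m + 1 := by omega
  calc (2 : ZMod m) * (((m + 1) / 2 : Nat) : ZMod m)
      = ((2 * ((m + 1) / 2) : Nat) : ZMod m) := by push_cast; ring
    _ = ((m + 1 : Nat) : ZMod m) := by rw [h]
    _ = 1 := by push_cast [ZMod.natCast_self]; ring

-- basic values
lemma pvW_one (n d : Int) : pvW n d 1 = (pvH n.toNat, pvH n.toNat) := by
  unfold pvW pvPow pvPow pvMul; exact Prod.ext (by dsimp; ring) (by dsimp; ring)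

lemma pvU_zero (n d : Int) : pvU n d 0 = 0 := by unfold pvU pvW pvPow; dsimp; ring
lemma pvV_zero (n d : Int) : pvV n d 0 = 2 := by unfold pvV pvW pvPow; dsimp; ring
lemma pvU_one (n d : Int) (hm : n.toNat % 2 = 1) : pvU n d 1 = 1 := by
  unfold pvU; rw [pvW_one]; exact pvH_two n.toNat hm
lemma pvV_one (n d : Int) (hm : n.toNat % 2 = 1) : pvV n d 1 = 1 := by
  unfold pvV; rw [pvW_one]; exact pvH_two n.toNat hm

-- the norm of α is Q = (1-d)/4 (exact division since d ≡ 1 mod 4)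
lemma pvNrm_alpha (n d : Int) (hm : n.toNat % 2 = 1) (hq : 4 * pvQc n d = 1 - (d : ZMod n.toNat)) :
    pvNrm n.toNat ((d : ZMod n.toNat)) (pvH n.toNat, pvH n.toNat) = pvQc n d := by
  have hh := pvH_two n.toNat hm
  unfold pvNrm; dsimp
  linear_combination (pvQc n d * (2 * pvH n.toNat + 1)) * hh - (pvH n.toNat * pvH n.toNat) * hq

-- Lucas doubling and addition laws
lemma pvU_dbl (n d : Int) (k : Nat) : pvU n d (2 * k) = pvU n d k * pvV n d k := by
  have h : 2 * k = k + k := by omega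
  unfold pvU pvV pvW
  rw [h, pvPow_add]
  unfold pvMul; dsimp; ring

lemma pvV_dbl (n d : Int) (k : Nat) (hm : n.toNat % 2 = 1)
    (hq : 4 * pvQc n d = 1 - (d : ZMod n.toNat)) :
    pvV n d (2 * k) = pvV n d k * pvV n d k - 2 * pvQc n d ^ k := by
  have h0 := pvNrm_pow n.toNat ((d : ZMod n.toNat)) (pvH n.toNat, pvH n.toNat) k
  rw [pvNrm_alpha n d hm hq] at h0
  unfold pvNrm at h0
  have h : 2 * k = k + k := by omega
  unfold pvV pvW
  rw [h, pvPow_add]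
  unfold pvMul
  dsimp
  linear_combination (-2 : ZMod n.toNat) * h0

lemma pvU_add (n d : Int) (a b : Nat) (hm : n.toNat % 2 = 1) :
    pvU n d (a + b) = pvH n.toNat * (pvU n d a * pvV n d b + pvU n d b * pvV n d a) := by
  have hh := pvH_two n.toNat hm
  unfold pvU pvV pvW
  rw [pvPow_add]
  unfold pvMul; dsimp
  set x := pvPow n.toNat ((d : ZMod n.toNat)) (pvH n.toNat, pvH n.toNat) a
  set y := pvPow n.toNat ((d : ZMod n.toNat)) (pvH n.toNat, pvH n.toNat) b
  linear_combination (-2 * (x.1 * y.2 + x.2 * y.1)) * hh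

lemma pvV_add (n d : Int) (a b : Nat) (hm : n.toNat % 2 = 1) :
    pvV n d (a + b) = pvH n.toNat * (pvV n d a * pvV n d b + (d : ZMod n.toNat) * pvU n d a * pvU n d b) := by
  have hh := pvH_two n.toNat hm
  unfold pvU pvV pvW
  rw [pvPow_add]
  unfold pvMul; dsimp
  set x := pvPow n.toNat ((d : ZMod n.toNat)) (pvH n.toNat, pvH n.toNat) a
  set y := pvPow n.toNat ((d : ZMod n.toNat)) (pvH n.toNat, pvH n.toNat) b
  linear_combination (-2 * (x.1 * y.1 + (d : ZMod n.toNat) * (x.2 * y.2))) * hh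

lemma pvU_succ (n d : Int) (k : Nat) :
    pvU n d (k + 1) = pvH n.toNat * (pvU n d k + pvV n d k) := by
  have h : k + 1 = 1 + k := by omega
  unfold pvU pvV pvW
  rw [h, pvPow_add]
  unfold pvMul
  rw [show pvPow n.toNat ((d : ZMod n.toNat)) (pvH n.toNat, pvH n.toNat) 1 = (pvH n.toNat, pvH n.toNat) from by
    unfold pvPow pvPow pvMul; exact Prod.ext (by dsimp; ring) (by dsimp; ring)]
  dsimp; ring

lemma pvV_succ (n d : Int) (k : Nat) :
    pvV n d (k + 1) = pvH n.toNat * ((d : ZMod n.toNat) * pvU n d k + pvV n d k) := by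
  have h : k + 1 = 1 + k := by omega
  unfold pvU pvV pvW
  rw [h, pvPow_add]
  unfold pvMul
  rw [show pvPow n.toNat ((d : ZMod n.toNat)) (pvH n.toNat, pvH n.toNat) 1 = (pvH n.toNat, pvH n.toNat) from by
    unfold pvPow pvPow pvMul; exact Prod.ext (by dsimp; ring) (by dsimp; ring)]
  dsimp; ring

-- ===== cast lemmas : Int computations land on ZMod n.toNat =====

lemma cast_n (n : Int) (hn : 0 ≤ n) : ((n : Int) : ZMod n.toNat) = 0 := by
  have h : ((n.toNat : Nat) : Int) = n := Int.toNat_of_nonneg hn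
  rw [← h]
  exact_mod_cast ZMod.natCast_self n.toNat

lemma cast_mod (n a : Int) (hn : 0 ≤ n) :
    ((PySem.Int.mod a n : Int) : ZMod n.toNat) = (a : ZMod n.toNat) := by
  have h := PySem.Int.floordiv_mul_add_mod a n
  have : (PySem.Int.mod a n : Int) = a - PySem.Int.floordiv a n * n := by omega
  rw [this]
  push_cast
  rw [cast_n n hn]
  ring

lemma halfMod_nonneg (n x : Int) (hn : 0 < n) : 0 ≤ halfMod n x := PySem.Int.mod_nonneg _ hn
lemma halfMod_lt (n x : Int) (hn : 0 < n) : halfMod n x < n := PySem.Int.mod_lt _ hn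

lemma cast_halfMod (n x : Int) (hn : 3 ≤ n) (hodd : n % 2 = 1) :
    ((halfMod n x : Int) : ZMod n.toNat) = pvH n.toNat * (x : ZMod n.toNat) := by
  have hm : n.toNat % 2 = 1 := by omega
  have hh := pvH_two n.toNat hm
  unfold halfMod
  set y := if PySem.Int.mod x 2 = 1 then x + n else x with hy
  have hx2 : PySem.Int.mod x 2 = x % 2 := PySem.Int.mod_eq_emod_of_pos (by omega)
  have hdvd : 2 ∣ y := by
    rw [hy]
    split_ifs with hb
    · rw [hx2] at hb; omega
    · rw [hx2] at hb
      have : x % 2 = 0 := by omega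
      omega
  have hcy : (y : ZMod n.toNat) = (x : ZMod n.toNat) := by
    rw [hy]; split_ifs
    · push_cast; rw [cast_n n (by omega)]; ring
    · rfl
  have hfd : PySem.Int.floordiv y 2 = y / 2 := PySem.Int.floordiv_eq_ediv_of_pos (by omega)
  have h2y : y / 2 * 2 = y := Int.ediv_mul_cancel hdvd
  rw [cast_mod n _ (by omega), hfd]
  have hcast : ((y / 2 : Int) : ZMod n.toNat) * 2 = (y : ZMod n.toNat) := by
    exact_mod_cast congrArg (fun z : Int => (z : ZMod n.toNat)) h2y
  rw [← hcy]
  linear_combination pvH n.toNat * hcast - ((y / 2 : Int) : ZMod n.toNat) * hh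

-- B's branchless halving is A's parity-fixup halving
lemma halve_eq (nn x : Int) : halve x nn = halfMod nn x := by
  have hx : PySem.Int.mod x 2 = x % 2 := PySem.Int.mod_eq_emod_of_pos (by omega)
  have h2 : x % 2 = 0 ∨ x % 2 = 1 := by omega
  unfold halve halfMod
  rw [hx]
  rcases h2 with h | h <;> rw [h] <;> norm_num

-- bit tests
lemma bit_band_shiftLeft (t : Int) (ht : 0 ≤ t) (i : Nat) :
    (PySem.Int.band t (1 <<< i) ≠ 0) ↔ t.toNat / 2 ^ i % 2 = 1 := by
  have hpos : (0 : Int) ≤ 1 <<< i := Int.natCast_nonneg _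
  have key : PySem.Int.band t (1 <<< i) = ((t.toNat &&& 2 ^ i : Nat) : Int) := by
    rw [PySem.Int.band_of_nonneg ht hpos]
    congr 1
    rw [Int.toNat_natCast, Nat.one_shiftLeft]
  rw [key, Nat.and_two_pow, Nat.testBit_eq_decide_div_mod_eq]
  by_cases hb : t.toNat / 2 ^ i % 2 = 1 <;> simp [hb]

lemma bit_shiftRight_mod_two (e : Int) (he : 0 ≤ e) (i : Nat) :
    (PySem.Int.mod (e >>> i) 2 = 1) ↔ e.toNat / 2 ^ i % 2 = 1 := by
  have h1 : e >>> i = ((e.toNat >>> i : Nat) : Int) := by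
    rcases Int.eq_ofNat_of_zero_le he with ⟨m, rfl⟩
    rfl
  rw [h1, PySem.Int.mod_eq_emod_of_pos (by omega)]
  rw [Nat.shiftRight_eq_div_pow]
  omega

-- injectivity of the cast on [0, n)
lemma cast_inj_range (n a b : Int) (hn : 0 < n) (ha : 0 ≤ a) (ha' : a < n)
    (hb : 0 ≤ b) (hb' : b < n) (h : (a : ZMod n.toNat) = (b : ZMod n.toNat)) : a = b := by
  rw [ZMod.intCast_eq_intCast_iff] at h
  have hmn : ((n.toNat : Nat) : Int) = n := Int.toNat_of_nonneg (by omega)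
  unfold Int.ModEq at h
  rw [hmn, Int.emod_eq_of_lt ha ha', Int.emod_eq_of_lt hb hb'] at h
  exact h

-- ===== the A-side loop invariant =====

def InvA (n d t : Int) (L : Nat) (i : Nat) (st : Int × Int × Int × Int × Int × Int) : Prop :=
  0 ≤ st.1 ∧ st.1 < n ∧ 0 ≤ st.2.2.1 ∧ st.2.2.1 < n ∧
  (st.1 : ZMod n.toNat) = pvU n d (2 * (t.toNat % 2 ^ i)) ∧
  (st.2.2.1 : ZMod n.toNat) = pvV n d (2 * (t.toNat % 2 ^ i)) ∧
  (st.2.1 : ZMod n.toNat) = pvU n d (2 ^ i) ∧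
  (st.2.2.2.1 : ZMod n.toNat) = pvV n d (2 ^ i) ∧
  (i < L → (st.2.2.2.2.1 : ZMod n.toNat) = pvQc n d ^ (2 ^ i) ∧
           (st.2.2.2.2.2 : ZMod n.toNat) = 2 * pvQc n d ^ (2 ^ i))

lemma invA_step (n d t : Int) (L : Nat) (hn : 3 ≤ n) (hodd : n % 2 = 1) (ht : 0 ≤ t)
    (hq : 4 * pvQc n d = 1 - (d : ZMod n.toNat))
    (i : Nat) (hiL : i < L) (st : Int × Int × Int × Int × Int × Int)
    (h : InvA n d t L i st) : InvA n d t L (i + 1) (stepA n d t L st i) := by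
  obtain ⟨u, u2, v, v2, qv, q2⟩ := st
  obtain ⟨hu0, hun, hv0, hvn, hcu, hcv, hcu2, hcv2, hqq⟩ := h
  obtain ⟨hcq, hcq2⟩ := hqq hiL
  have hm : n.toNat % 2 = 1 := by omega
  set s := t.toNat % 2 ^ i with hs
  have hpow : (2 : Nat) ^ (i + 1) = 2 ^ i * 2 := by rw [pow_succ]
  have hmod : t.toNat % 2 ^ (i + 1) = s + 2 ^ i * (t.toNat / 2 ^ i % 2) := by
    rw [hpow, Nat.mod_mul]
  have hu2' : ((PySem.Int.mod (u2 * v2) n : Int) : ZMod n.toNat) = pvU n d (2 ^ (i + 1)) := by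
    rw [cast_mod n _ (by omega)]; push_cast
    rw [hcu2, hcv2, ← pvU_dbl]
    congr 1
    omega
  have hv2' : ((PySem.Int.mod (v2 * v2 - q2) n : Int) : ZMod n.toNat) = pvV n d (2 ^ (i + 1)) := by
    rw [cast_mod n _ (by omega)]; push_cast
    rw [hcv2, hcq2, show (2 : Nat) ^ (i + 1) = 2 * 2 ^ i from by omega, pvV_dbl n d (2 ^ i) hm hq]
  have hqnew : ((PySem.Int.mod (qv * qv) n : Int) : ZMod n.toNat) = pvQc n d ^ 2 ^ (i + 1) := by
    rw [cast_mod n _ (by omega)]; push_cast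
    rw [hcq, ← pow_add]
    congr 1
    omega
  unfold stepA
  dsimp only
  by_cases hbit : PySem.Int.band t (1 <<< i) ≠ 0
  · have hb1 : t.toNat / 2 ^ i % 2 = 1 := (bit_band_shiftLeft t ht i).mp hbit
    have hidx : t.toNat % 2 ^ (i + 1) = s + 2 ^ i := by rw [hmod, hb1, mul_one]
    rw [if_pos hbit]
    have hcunew : ((halfMod n (PySem.Int.mod (u2 * v2) n * v + u * PySem.Int.mod (v2 * v2 - q2) n) : Int) :
        ZMod n.toNat) = pvU n d (2 * (t.toNat % 2 ^ (i + 1))) := by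
      rw [cast_halfMod n _ hn hodd]; push_cast
      rw [hu2', hv2', hcu, hcv,
        show 2 * (t.toNat % 2 ^ (i + 1)) = 2 ^ (i + 1) + 2 * s from by rw [hidx]; omega,
        pvU_add n d (2 ^ (i + 1)) (2 * s) hm]
    have hcvnew : ((halfMod n (PySem.Int.mod (v2 * v2 - q2) n * v + PySem.Int.mod (u2 * v2) n * u * d) : Int) :
        ZMod n.toNat) = pvV n d (2 * (t.toNat % 2 ^ (i + 1))) := by
      rw [cast_halfMod n _ hn hodd]; push_cast
      rw [hu2', hv2', hcu, hcv,
        show 2 * (t.toNat % 2 ^ (i + 1)) = 2 ^ (i + 1) + 2 * s from by rw [hidx]; omega,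
        pvV_add n d (2 ^ (i + 1)) (2 * s) hm]
      ring
    by_cases hless : i < L - 1
    · rw [if_pos hless]
      refine ⟨halfMod_nonneg n _ (by omega), halfMod_lt n _ (by omega),
        halfMod_nonneg n _ (by omega), halfMod_lt n _ (by omega),
        hcunew, hcvnew, hu2', hv2', fun _ => ⟨hqnew, ?_⟩⟩
      show ((PySem.Int.mod (qv * qv) n + PySem.Int.mod (qv * qv) n : Int) : ZMod n.toNat) = _
      push_cast
      rw [hqnew]
      ring
    · rw [if_neg hless]
      exact ⟨halfMod_nonneg n _ (by omega), halfMod_lt n _ (by omega),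
        halfMod_nonneg n _ (by omega), halfMod_lt n _ (by omega),
        hcunew, hcvnew, hu2', hv2', fun hc => absurd hc (by omega)⟩
  · have hb0 : t.toNat / 2 ^ i % 2 = 0 := by
      have := bit_band_shiftLeft t ht i
      omega
    have hidx : t.toNat % 2 ^ (i + 1) = s := by rw [hmod, hb0, mul_zero, add_zero]
    rw [if_neg hbit]
    by_cases hless : i < L - 1
    · rw [if_pos hless]
      refine ⟨hu0, hun, hv0, hvn, by rw [hidx]; exact hcu, by rw [hidx]; exact hcv,
        hu2', hv2', fun _ => ⟨hqnew, ?_⟩⟩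
      show ((PySem.Int.mod (qv * qv) n + PySem.Int.mod (qv * qv) n : Int) : ZMod n.toNat) = _
      push_cast
      rw [hqnew]
      ring
    · rw [if_neg hless]
      exact ⟨hu0, hun, hv0, hvn, by rw [hidx]; exact hcu, by rw [hidx]; exact hcv,
        hu2', hv2', fun hc => absurd hc (by omega)⟩

lemma invA_all (n d t : Int) (L : Nat) (q : Int) (hn : 3 ≤ n) (hodd : n % 2 = 1) (ht : 0 ≤ t)
    (hq : 4 * pvQc n d = 1 - (d : ZMod n.toNat)) (hqdef : q = PySem.Int.floordiv (1 - d) 4) :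
    ∀ i, i ≤ L → InvA n d t L i ((List.range i).foldl (stepA n d t L) (0, 1, 2, 1, q, 2 * q)) := by
  have hm : n.toNat % 2 = 1 := by omega
  intro i
  induction i with
  | zero =>
    intro _
    simp only [List.range_zero, List.foldl_nil]
    have hz : 2 * (t.toNat % 2 ^ 0) = 0 := by omega
    refine ⟨by show (0 : Int) ≤ 0; omega, by show (0 : Int) < n; omega,
      by show (0 : Int) ≤ 2; omega, by show (2 : Int) < n; omega,
      ?_, ?_, ?_, ?_, fun _ => ⟨?_, ?_⟩⟩
    · show ((0 : Int) : ZMod n.toNat) = pvU n d (2 * (t.toNat % 2 ^ 0))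
      rw [hz, pvU_zero, Int.cast_zero]
    · show ((2 : Int) : ZMod n.toNat) = pvV n d (2 * (t.toNat % 2 ^ 0))
      rw [hz, pvV_zero]
      norm_num
    · show ((1 : Int) : ZMod n.toNat) = pvU n d (2 ^ 0)
      rw [pow_zero, pvU_one n d hm, Int.cast_one]
    · show ((1 : Int) : ZMod n.toNat) = pvV n d (2 ^ 0)
      rw [pow_zero, pvV_one n d hm, Int.cast_one]
    · show ((q : Int) : ZMod n.toNat) = pvQc n d ^ 2 ^ 0
      rw [hqdef]; unfold pvQc; rw [pow_zero, pow_one]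
    · show ((2 * q : Int) : ZMod n.toNat) = 2 * pvQc n d ^ 2 ^ 0
      push_cast
      rw [hqdef]; unfold pvQc; rw [pow_one]
  | succ i ih =>
    intro hle
    rw [List.range_succ, List.foldl_append, List.foldl_cons, List.foldl_nil]
    exact invA_step n d t L hn hodd ht hq i (by omega) _ (ih (by omega))

-- ===== the B-side ladder invariant =====

def InvB (n d : Int) (k : Nat) (st : Int × Int × Int) : Prop :=
  0 ≤ st.1 ∧ st.1 < n ∧
  (st.1 : ZMod n.toNat) = pvU n d k ∧
  (st.2.1 : ZMod n.toNat) = pvV n d k ∧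
  (st.2.2 : ZMod n.toNat) = pvQc n d ^ k

lemma ladder_inv (n d q e : Int) (hn : 3 ≤ n) (hodd : n % 2 = 1) (he : 0 ≤ e)
    (hq : 4 * pvQc n d = 1 - (d : ZMod n.toNat)) (hqdef : q = PySem.Int.floordiv (1 - d) 4) :
    ∀ i (st : Int × Int × Int), InvB n d (e.toNat / 2 ^ i) st →
      InvB n d e.toNat (ladder n d q e i st) := by
  have hm : n.toNat % 2 = 1 := by omega
  intro i
  induction i with
  | zero =>
    intro st h
    simpa [ladder] using h
  | succ i ih =>
    rintro ⟨u, v, qk⟩ ⟨hu0, hun, hcu, hcv, hcq⟩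
    set k1 := e.toNat / 2 ^ (i + 1) with hk1
    have hk1' : k1 = e.toNat / 2 ^ i / 2 := by rw [hk1, Nat.div_div_eq_div_mul, ← pow_succ]
    have hqcast : ((q : Int) : ZMod n.toNat) = pvQc n d := by rw [hqdef]; unfold pvQc; rfl
    have hcu' : ((PySem.Int.mod (u * v) n : Int) : ZMod n.toNat) = pvU n d (2 * k1) := by
      rw [cast_mod n _ (by omega)]; push_cast
      rw [hcu, hcv, pvU_dbl]
    have hcv' : ((PySem.Int.mod (v * v - 2 * qk) n : Int) : ZMod n.toNat) = pvV n d (2 * k1) := by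
      rw [cast_mod n _ (by omega)]; push_cast
      rw [hcv, hcq, pvV_dbl n d k1 hm hq]
    have hcq' : ((PySem.Int.mod (qk * qk) n : Int) : ZMod n.toNat) = pvQc n d ^ (2 * k1) := by
      rw [cast_mod n _ (by omega)]; push_cast
      rw [hcq, ← pow_add]
      congr 1
      omega
    show InvB n d e.toNat (ladder n d q e (i + 1) (u, v, qk))
    unfold ladder
    dsimp only
    by_cases hbit : PySem.Int.mod (e >>> i) 2 = 1
    · rw [if_pos hbit]
      have hb1 : e.toNat / 2 ^ i % 2 = 1 := (bit_shiftRight_mod_two e he i).mp hbit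
      have hki : e.toNat / 2 ^ i = 2 * k1 + 1 := by omega
      refine ih _ ?_
      simp only [halve_eq]
      refine ⟨halfMod_nonneg n _ (by omega), halfMod_lt n _ (by omega), ?_, ?_, ?_⟩
      · show ((halfMod n _ : Int) : ZMod n.toNat) = _
        rw [cast_halfMod n _ hn hodd]; push_cast
        rw [hcu', hcv', hki, pvU_succ]
      · show ((halfMod n _ : Int) : ZMod n.toNat) = _
        rw [cast_halfMod n _ hn hodd]; push_cast
        rw [hcu', hcv', hki, pvV_succ]
      · show ((PySem.Int.mod _ n : Int) : ZMod n.toNat) = _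
        rw [cast_mod n _ (by omega)]; push_cast
        rw [hcq', hqcast, hki, pow_succ]
    · rw [if_neg hbit]
      have hb0 : e.toNat / 2 ^ i % 2 = 0 := by
        have h01 : 0 ≤ PySem.Int.mod (e >>> i) 2 := PySem.Int.mod_nonneg _ (by omega)
        have h02 : PySem.Int.mod (e >>> i) 2 < 2 := PySem.Int.mod_lt _ (by omega)
        have := bit_shiftRight_mod_two e he i
        omega
      have hki : e.toNat / 2 ^ i = 2 * k1 := by omega
      refine ih _ ?_
      exact ⟨PySem.Int.mod_nonneg _ (by omega), PySem.Int.mod_lt _ (by omega),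
        by rw [hki]; exact hcu', by rw [hki]; exact hcv', by rw [hki]; exact hcq'⟩

-- B's _select_d walks the same candidates as A's inline loop
lemma findD_eq_selectD (n : Int) : ∀ (f : Nat) (dAbs sign : Int), 5 ≤ dAbs →
    (dAbs % 4 = 1 ∧ sign = 1 ∨ dAbs % 4 = 3 ∧ sign = -1) →
    findD n f dAbs = selectD n f dAbs sign (dAbs * sign) := by
  intro f
  induction f with
  | zero => intro dAbs sign _ _; rfl
  | succ f ih =>
    intro dAbs sign h5 hinv
    have hmod : PySem.Int.mod dAbs 4 = dAbs % 4 := PySem.Int.mod_eq_emod_of_pos (by omega)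
    have hd : (if PySem.Int.mod dAbs 4 = 1 then dAbs else -dAbs) = dAbs * sign := by
      rw [hmod]
      rcases hinv with ⟨h4, hs⟩ | ⟨h4, hs⟩ <;> subst hs <;> simp [h4]
    simp only [findD, selectD]
    rw [hd]
    split_ifs
    · rfl
    · rfl
    · exact ih (dAbs + 2) (sign * -1)
        (by omega)
        (by rcases hinv with ⟨h4, hs⟩ | ⟨h4, hs⟩ <;> subst hs <;> [right; left] <;> constructor <;> omega)

-- d returned by the D-selection satisfies d ≡ 1 (mod 4)
lemma selectD_mod4 : ∀ (n : Int) (f : Nat) (dAbs sign d : Int),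
    (dAbs % 4 = 1 ∧ sign = 1 ∨ dAbs % 4 = 3 ∧ sign = -1) → d = dAbs * sign →
    ∀ d', selectD n f dAbs sign d = some (some d') → d' % 4 = 1 := by
  intro n f
  induction f with
  | zero => intro dAbs sign d _ _ d' hsel; simp [selectD] at hsel
  | succ f ih =>
    intro dAbs sign d hinv hd d' hsel
    unfold selectD at hsel
    split_ifs at hsel with h1 h2
    · simp at hsel
    · simp at hsel
      rcases hinv with ⟨h4, hs⟩ | ⟨h4, hs⟩ <;> subst hs <;> omega
    · exact ih (dAbs + 2) (sign * -1) ((dAbs + 2) * (sign * -1))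
        (by rcases hinv with ⟨h4, hs⟩ | ⟨h4, hs⟩ <;> subst hs <;> [right; left] <;> constructor <;> omega)
        rfl d' hsel

-- the two cores agree for odd n ≥ 3 and d ≡ 1 (mod 4)
lemma core_eq (n d : Int) (hn : 3 ≤ n) (hodd : n % 2 = 1) (hd : d % 4 = 1) :
    lucasCore n d
      = (let q := PySem.Int.floordiv (1 - d) 4
         let e := n + 1
         let fin := ladder n d q e (PySem.Int.bitLength e - 1) (1, 1, PySem.Int.mod q n)
         (fin.1 == 0)) := by
  have hm : n.toNat % 2 = 1 := by omega
  have hqc : 4 * pvQc n d = 1 - (d : ZMod n.toNat) := by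
    have hfd : PySem.Int.floordiv (1 - d) 4 = (1 - d) / 4 :=
      PySem.Int.floordiv_eq_ediv_of_pos (by omega)
    have hdvd : (4 : Int) ∣ (1 - d) := by omega
    have hmul : ((1 - d) / 4 : Int) * 4 = 1 - d := Int.ediv_mul_cancel hdvd
    have hc := congrArg (fun z : Int => (z : ZMod n.toNat)) hmul
    push_cast at hc
    unfold pvQc
    rw [hfd]
    linear_combination hc
  unfold lucasCore
  dsimp only
  set q := PySem.Int.floordiv (1 - d) 4 with hqdef
  set t := PySem.Int.floordiv (n + 1) 2 with htdef
  have hft : t = (n + 1) / 2 := PySem.Int.floordiv_eq_ediv_of_pos (by omega)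
  have h2t : 2 * t = n + 1 := by rw [hft]; omega
  have ht0 : 0 ≤ t := by omega
  set L := PySem.Int.bitLength t with hL
  set L' := PySem.Int.bitLength (n + 1) with hL'
  have hA := invA_all n d t L q hn hodd ht0 hqc hqdef L (le_refl L)
  have htlt : t.toNat < 2 ^ L := by
    have h := PySem.Int.lt_two_pow_bitLength t
    rw [← hL] at h
    omega
  have hmodL : t.toNat % 2 ^ L = t.toNat := Nat.mod_eq_of_lt htlt
  have hne : (n + 1) ≠ 0 := by omega
  have hlt' : (n + 1).toNat < 2 ^ L' := by
    have h := PySem.Int.lt_two_pow_bitLength (n + 1)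
    rw [← hL'] at h
    omega
  have hle' : 2 ^ (L' - 1) ≤ (n + 1).toNat := by
    have h := PySem.Int.two_pow_bitLength_le (n + 1) hne
    rw [← hL'] at h
    omega
  have hL'2 : 2 ≤ L' := by
    by_contra hc
    have h1 : L' ≤ 1 := by omega
    have h2 : 2 ^ L' ≤ 2 ^ 1 := Nat.pow_le_pow_right (by norm_num) h1
    omega
  have hpos : 0 < 2 ^ (L' - 1) := by positivity
  have hdiv1 : (n + 1).toNat / 2 ^ (L' - 1) = 1 := by
    have hge : 1 ≤ (n + 1).toNat / 2 ^ (L' - 1) := (Nat.one_le_div_iff hpos).mpr hle'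
    have hp2 : 2 ^ L' = 2 ^ (L' - 1) * 2 := by
      rw [← pow_succ]
      congr 1
      omega
    have hl2 : (n + 1).toNat / 2 ^ (L' - 1) < 2 := by
      rw [Nat.div_lt_iff_lt_mul hpos]
      omega
    omega
  have hinit : InvB n d ((n + 1).toNat / 2 ^ (L' - 1)) (1, 1, PySem.Int.mod q n) := by
    rw [hdiv1]
    refine ⟨by show (0 : Int) ≤ 1; omega, by show (1 : Int) < n; omega, ?_, ?_, ?_⟩
    · show ((1 : Int) : ZMod n.toNat) = pvU n d 1
      rw [pvU_one n d hm, Int.cast_one]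
    · show ((1 : Int) : ZMod n.toNat) = pvV n d 1
      rw [pvV_one n d hm, Int.cast_one]
    · show ((PySem.Int.mod q n : Int) : ZMod n.toNat) = pvQc n d ^ 1
      rw [cast_mod n q (by omega), pow_one, hqdef]
      rfl
  have hB := ladder_inv n d q (n + 1) hn hodd (by omega) hqc hqdef (L' - 1) _ hinit
  have hidx : (n + 1).toNat = 2 * (t.toNat % 2 ^ L) := by
    rw [hmodL]
    omega
  obtain ⟨hA0, hA1, _, _, hAc, _⟩ := hA
  obtain ⟨hB0, hB1, hBc, _⟩ := hB
  have heq : ((List.range L).foldl (stepA n d t L) (0, 1, 2, 1, q, 2 * q)).1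
      = (ladder n d q (n + 1) (L' - 1) (1, 1, PySem.Int.mod q n)).1 := by
    refine cast_inj_range n _ _ (by omega) hA0 hA1 hB0 hB1 ?_
    rw [hAc, hBc, hidx]
  rw [heq]

-- ===== VERDICT =====
theorem lucasPP_spec : Claim_equal_lucasPP := by
  intro n _
  show lucasPP n = lucasPP_alt n
  unfold lucasPP lucasPP_alt
  by_cases h1 : PySem.Int.mod n 2 = 0 ∨ n < 3
  · rw [if_pos h1, if_pos (Or.comm.mp h1)]
  · rw [if_neg h1, if_neg (fun h => h1 (Or.comm.mp h))]
    by_cases h2 : iroot 2 n ^ 2 = n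
    · rw [if_pos h2, if_pos h2]
    · rw [if_neg h2, if_neg h2]
      rw [findD_eq_selectD n 1000000 5 1 (by omega) (by omega)]
      rw [show (5 : Int) * 1 = 5 from by ring]
      cases hsel : selectD n 1000000 5 1 5 with
      | none => rfl
      | some o =>
        cases o with
        | none => rfl
        | some d =>
          have hmod : PySem.Int.mod n 2 = n % 2 := PySem.Int.mod_eq_emod_of_pos (by omega)
          have hn3 : 3 ≤ n := by
            rcases not_or.mp h1 with ⟨_, h⟩; omega
          have hodd : n % 2 = 1 := by
            rcases not_or.mp h1 with ⟨h, _⟩; rw [hmod] at h; omega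
          have hd : d % 4 = 1 :=
            selectD_mod4 n 1000000 5 1 5 (by omega) (by ring) d hsel
          exact core_eq n d hn3 hodd hd
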